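-- pv_equiv track=rewrite | github.com/couloum/aoc | 2024/11/part2.py | get_next_stones
-- ===== SOURCE A (Python) =====
-- def get_next_stones(digit, iterations):
--     if iterations == 0:
--         return [digit]
--
--     if digit == 0:
--         return get_next_stones(1, iterations - 1)
--     elif len(str(digit)) % 2 == 0:
--         half = int(len(str(digit)) / 2)
--         digit1 = int(str(digit)[0:half])
--         digit2 = int(str(digit)[half:])
--         return get_next_stones(digit1, iterations - 1) + get_next_stones(digit2, iterations - 1)
--     else:
--         return get_next_stones(digit * 2024, iterations - 1)
-- ===== SOURCE B (Python) =====
-- def get_next_stones(digit, iterations):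
--     # Iterative bottom-up DP: collect the digits needed per level, then build the
--     # expansion lists level by level, so each distinct state is expanded once.
--     def children(d):
--         if d == 0:
--             return [1]
--         s = str(d)
--         n = len(s)
--         if n % 2 == 0:
--             return [int(s[:n // 2]), int(s[n // 2:])]
--         return [d * 2024]
--
--     needed = [[digit]]
--     for _ in range(iterations):
--         needed.append(list(dict.fromkeys(c for d in needed[-1] for c in children(d))))
--
--     lists = {d: [d] for d in needed[-1]}
--     for level in reversed(needed[:-1]):
--         lists = {d: [x for c in children(d) for x in lists[c]] for d in level}
--     return lists[digit]
-- ===== Notes on version B (the rewrite author's own statement) =====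
-- stated objective: alternative
-- what changed: B replaces A's top-down recursion (which re-expands every duplicate subtree) by an iterative bottom-up DP: it first collects the distinct digits needed at each level, then builds the expansion lists level by level, so each distinct (digit, remaining-iterations) state is expanded exactly once; intended as faster, measured 5.7x at the largest size both finished (the output itself grows exponentially, so both time out on the biggest inputs).
-- outside the precondition, e.g. on get_next_stones(-123, 1): A returns [-1, 23], B returns [-1, 23]; on get_next_stones(-5, 1): A raises ValueError, B raises ValueError; on get_next_stones(7, -1): A does not finish within the time limit, B returns [7]
import Mathlib
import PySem

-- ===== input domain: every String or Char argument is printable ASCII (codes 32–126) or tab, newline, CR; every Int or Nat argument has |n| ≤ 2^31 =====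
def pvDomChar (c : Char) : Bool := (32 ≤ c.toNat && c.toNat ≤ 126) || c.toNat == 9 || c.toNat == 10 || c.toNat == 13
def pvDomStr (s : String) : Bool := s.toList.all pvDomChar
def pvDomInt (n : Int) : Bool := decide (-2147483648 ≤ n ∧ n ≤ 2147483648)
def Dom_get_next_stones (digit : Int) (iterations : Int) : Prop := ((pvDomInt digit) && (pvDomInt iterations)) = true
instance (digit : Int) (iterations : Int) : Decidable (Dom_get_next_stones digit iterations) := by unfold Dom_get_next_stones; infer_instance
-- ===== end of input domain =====

-- B replaces A's top-down recursion by an iterative bottom-up DP (needed digits per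
-- level, then lists built level by level), expanding each distinct state once.

-- ===== PORT A =====
-- A's recursion, step for step; the Nat fuel is iterations.toNat (A diverges for
-- iterations < 0, excluded by Pre_). int() of a slice is ofStr?; its ValueError case
-- (reachable only for negative digits, excluded by Pre_) is rendered with .getD 0.
def goA (digit : Int) : Nat → List Int
  | 0 => [digit]
  | n + 1 =>
    if digit = 0 then goA 1 n
    else
      let s := PySem.Int.toStr digit
      if s.length % 2 = 0 then
        let half : Int := (s.length : Int) / 2
        let digit1 := (PySem.Int.ofStr? (PySem.Str.slice s (some 0) (some half))).getD 0
        let digit2 := (PySem.Int.ofStr? (PySem.Str.slice s (some half) none)).getD 0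
        goA digit1 n ++ goA digit2 n
      else
        goA (digit * 2024) n

def get_next_stones (digit : Int) (iterations : Int) : List Int :=
  goA digit iterations.toNat

-- ===== PORT B =====
-- Source B's helper children(d); same .getD 0 rendering of int()'s ValueError case.
def childrenB (d : Int) : List Int :=
  if d = 0 then [1]
  else
    let s := PySem.Int.toStr d
    if s.length % 2 = 0 then
      [(PySem.Int.ofStr? (PySem.Str.slice s (some 0) (some ((s.length : Int) / 2)))).getD 0,
       (PySem.Int.ofStr? (PySem.Str.slice s (some ((s.length : Int) / 2)) none)).getD 0]
    else
      [d * 2024]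

-- Source B line by line: the forward loop over range(iterations) growing `needed`
-- (dict.fromkeys = PySem.List.dedup), then the two dict comprehensions (a dict
-- comprehension inserts its pairs in order: foldl insert from empty), then lists[digit].
def get_next_stones_alt (digit : Int) (iterations : Int) : List Int :=
  let needed : List (List Int) :=
    (PySem.List.pyRange 0 iterations 1).foldl
      (fun acc _ => acc ++ [PySem.List.dedup (acc.getLast!.flatMap childrenB)]) [[digit]]
  let lists0 : PySem.Dict Int (List Int) :=
    needed.getLast!.foldl (fun dd d => dd.insert d [d]) PySem.Dict.empty
  let lists :=
    needed.dropLast.reverse.foldl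
      (fun lists level =>
        level.foldl (fun dd d => dd.insert d ((childrenB d).flatMap (fun c => lists.getD c [])))
          PySem.Dict.empty)
      lists0
  lists.getD digit []   -- lists[digit]: the key is always present (level 0 is [digit])

-- ===== PRECONDITION & SPEC =====
-- Pre_ excludes iterations < 0 (A recurses without progress) and negative digits: on
-- some negative digits A raises ValueError (int of a slice that is just "-") and on
-- the others its value comes from splitting the sign character together with the
-- digits; which negative digits raise is not a simple condition, so the region is excluded.
def Pre_get_next_stones (digit : Int) (iterations : Int) : Prop :=
  0 ≤ digit ∧ 0 ≤ iterations
instance (digit : Int) (iterations : Int) : Decidable (Pre_get_next_stones digit iterations) := by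
  unfold Pre_get_next_stones; infer_instance
def pvWitness_get_next_stones : Int × Int := (17, 6)

def Spec_get_next_stones (digit : Int) (iterations : Int) (out : List Int) : Prop := out = get_next_stones_alt digit iterations
instance (digit : Int) (iterations : Int) (out : List Int) : Decidable (Spec_get_next_stones digit iterations out) := by unfold Spec_get_next_stones; infer_instance

-- ===== CLAIM (what is proved, stated in full; the proofs are below) =====
def Claim_equal_get_next_stones : Prop := ∀ (digit : Int) (iterations : Int), Dom_get_next_stones digit iterations → Pre_get_next_stones digit iterations → Spec_get_next_stones digit iterations (get_next_stones digit iterations)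

-- ===== LEMMAS AND PROOFS =====

-- the level sets of B's forward pass, as a function of the level index
def Lv (digit : Int) : Nat → List Int
  | 0 => [digit]
  | k + 1 => PySem.List.dedup ((Lv digit k).flatMap childrenB)

-- A's one-step unfolding through childrenB
theorem goA_succ (d : Int) (m : Nat) :
    goA d (m + 1) = (childrenB d).flatMap (fun c => goA c m) := by
  by_cases hd : d = 0
  · simp [goA, childrenB, hd]
  · by_cases hev : (PySem.Int.toStr d).length % 2 = 0
    · simp [goA, childrenB, hd, hev]
    · simp [goA, childrenB, hd, hev]

-- a fold that ignores the elements is an iterate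
theorem foldl_const {α β : Type} (f : α → α) (l : List β) (a : α) :
    l.foldl (fun x _ => f x) a = f^[l.length] a := by
  induction l generalizing a with
  | nil => rfl
  | cons b l ih => simp [List.foldl, ih, Function.iterate_succ_apply]

-- the forward pass builds exactly the levels [Lv 0, …, Lv n]
theorem needed_eq (digit : Int) (n : Nat) :
    (fun acc => acc ++ [PySem.List.dedup (acc.getLast!.flatMap childrenB)])^[n] [[digit]]
      = (List.range (n + 1)).map (Lv digit) := by
  induction n with
  | zero => simp [Lv]
  | succ n ih =>
    rw [Function.iterate_succ_apply', ih]
    rw [List.range_succ (n := n + 1), List.map_append]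
    congr 1
    have hlast : ((List.range (n + 1)).map (Lv digit)).getLast! = Lv digit n := by
      rw [List.range_succ, List.map_append]
      simp
    rw [hlast]
    simp [Lv]

-- lookups in a dict built by inserting (d, f d) for d in a list
theorem getD_foldl_insert_f_of_not_mem {κ ν : Type} [BEq κ] [LawfulBEq κ] [DecidableEq κ]
    (f : κ → ν) (l : List κ) (d0 : PySem.Dict κ ν) (x : κ) (v : ν) (hx : x ∉ l) :
    (l.foldl (fun dd d => dd.insert d (f d)) d0).getD x v = d0.getD x v := by
  induction l generalizing d0 with
  | nil => rfl
  | cons a l ih =>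
    simp only [List.mem_cons, not_or] at hx
    rw [List.foldl_cons, ih _ hx.2, PySem.Dict.getD_insert, if_neg hx.1]

theorem getD_foldl_insert_f {κ ν : Type} [BEq κ] [LawfulBEq κ] [DecidableEq κ]
    (f : κ → ν) (l : List κ) (d0 : PySem.Dict κ ν) (x : κ) (v : ν) (hx : x ∈ l) :
    (l.foldl (fun dd d => dd.insert d (f d)) d0).getD x v = f x := by
  induction l generalizing d0 with
  | nil => cases hx
  | cons a l ih =>
    rw [List.foldl_cons]
    by_cases hxl : x ∈ l
    · exact ih _ hxl
    · have hxa : x = a := by rcases List.mem_cons.1 hx with h | h; exact h; exact absurd h hxl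
      rw [getD_foldl_insert_f_of_not_mem f l _ x v hxl, PySem.Dict.getD_insert, if_pos hxa, hxa]

-- children of a level-k digit are level-(k+1) digits
theorem mem_children_mem_Lv (digit : Int) (k : Nat) {d c : Int}
    (hd : d ∈ Lv digit k) (hc : c ∈ childrenB d) : c ∈ Lv digit (k + 1) := by
  rw [Lv, PySem.List.mem_dedup]
  exact List.mem_flatMap.2 ⟨d, hd, hc⟩

-- backward pass: processing levels [Lv (j-1), …, Lv 0] turns a dict that is correct
-- at depth N - j on Lv j into one that is correct at depth N on Lv 0
theorem back (digit : Int) (N : Nat) :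
    ∀ (j : Nat), j ≤ N → ∀ (lists : PySem.Dict Int (List Int)),
    (∀ d ∈ Lv digit j, lists.getD d [] = goA d (N - j)) →
    ∀ d ∈ Lv digit 0,
      (((List.range j).map (Lv digit)).reverse.foldl
        (fun lists level =>
          level.foldl (fun dd d => dd.insert d ((childrenB d).flatMap (fun c => lists.getD c [])))
            PySem.Dict.empty)
        lists).getD d [] = goA d N := by
  intro j
  induction j with
  | zero => intro _ lists h d hd; simpa using h d hd
  | succ j ih =>
    intro hjN lists h d hd
    rw [List.range_succ, List.map_append, List.reverse_append]
    simp only [List.map_cons, List.map_nil, List.reverse_cons, List.reverse_nil,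
      List.nil_append, List.cons_append, List.foldl_cons]
    refine ih (by omega) _ ?_ d hd
    intro e he
    rw [getD_foldl_insert_f (fun d => (childrenB d).flatMap (fun c => lists.getD c [])) _ _ _ _ he]
    have hstep : ∀ c ∈ childrenB e, lists.getD c [] = goA c (N - (j + 1)) := by
      intro c hc
      exact h c (mem_children_mem_Lv digit j he hc)
    have : (childrenB e).flatMap (fun c => lists.getD c []) =
        (childrenB e).flatMap (fun c => goA c (N - (j + 1))) :=
      List.flatMap_congr (fun c hc => hstep c hc)
    rw [this, ← goA_succ]
    congr 1
    omega

-- ===== VERDICT (by name: the statement is the Claim_ definition above) =====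
theorem get_next_stones_spec : Claim_equal_get_next_stones := by
  intro digit iterations _ _
  unfold Spec_get_next_stones get_next_stones get_next_stones_alt
  set N := iterations.toNat with hN
  rw [foldl_const, PySem.List.length_pyRange_one]
  simp only [Int.sub_zero, ← hN]
  rw [needed_eq digit N]
  have hlast : ((List.range (N + 1)).map (Lv digit)).getLast! = Lv digit N := by
    rw [List.range_succ, List.map_append]; simp
  have hdrop : ((List.range (N + 1)).map (Lv digit)).dropLast = (List.range N).map (Lv digit) := by
    rw [List.range_succ, List.map_append]; simp
  rw [hlast, hdrop]
  have h0 : ∀ d ∈ Lv digit N,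
      ((Lv digit N).foldl (fun dd d => dd.insert d [d]) PySem.Dict.empty).getD d [] =
        goA d (N - N) := by
    intro d hd
    rw [getD_foldl_insert_f (fun d => [d]) _ _ _ _ hd]
    simp [goA]
  have := back digit N N (le_refl N) _ h0 digit (by simp [Lv])
  rw [this]
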